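-- pv_equiv track=rewrite | github.com/ClaudioCarvalhoo/you-can-accomplish-anything-with-just-enough-determination-and-a-little-bit-of-luck | problems/LC744.py | searchForNextIndex
-- ===== SOURCE A (Python) =====
-- def searchForNextIndex(letters, target):
--     start = 0
--     end = len(letters)
--     while start < end:
--         midpoint = start + ((end - start) // 2)
--         if letters[midpoint] > target:
--             end = midpoint
--         else:
--             start = midpoint + 1
--     return start
-- ===== SOURCE B (Python) =====
-- def searchForNextIndex(letters, target):
--     for i, letter in enumerate(letters):
--         if letter > target:
--             return i
--     return len(letters)
-- ===== Notes on version B (the rewrite author's own statement) =====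
-- stated objective: simpler
-- what changed: Replaces the hand-written binary search with a single linear scan returning the first index whose letter is strictly greater than target (len(letters) if none).
-- outside the precondition, e.g. on searchForNextIndex(['b', 'a'], 'a'): A returns 2, B returns 0
import Mathlib
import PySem

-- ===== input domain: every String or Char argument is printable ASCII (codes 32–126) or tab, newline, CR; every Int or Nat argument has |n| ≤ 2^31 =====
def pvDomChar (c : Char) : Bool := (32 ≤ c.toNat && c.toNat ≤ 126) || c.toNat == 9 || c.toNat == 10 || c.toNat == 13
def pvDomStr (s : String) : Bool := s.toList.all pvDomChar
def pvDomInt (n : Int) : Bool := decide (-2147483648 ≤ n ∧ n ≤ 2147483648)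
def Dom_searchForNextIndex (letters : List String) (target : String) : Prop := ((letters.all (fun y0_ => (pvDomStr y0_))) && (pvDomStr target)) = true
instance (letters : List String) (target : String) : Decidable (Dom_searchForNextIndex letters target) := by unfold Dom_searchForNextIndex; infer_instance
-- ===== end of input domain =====

-- B replaces the binary search with a plain linear scan (first index whose letter exceeds target);
-- objective: simpler. Equal to A on input partitioned around target (which includes all sorted input, binary search's contract).

-- ===== PORT A =====
-- the while loop: state (start, end_); terminates because end_ - start shrinks.
-- letters[midpoint] is always in range here (0 ≤ start ≤ midpoint < end_ ≤ len), so pyGetD's default is never used.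
def searchForNextIndexLoop (letters : List String) (target : String) (start : Int) (end_ : Int) : Int :=
  if h : start < end_ then
    let midpoint := start + PySem.Int.floordiv (end_ - start) 2
    if target < PySem.List.pyGetD letters midpoint "" then
      searchForNextIndexLoop letters target start midpoint
    else
      searchForNextIndexLoop letters target (midpoint + 1) end_
  else start
termination_by (end_ - start).toNat
decreasing_by
  · have h2 : PySem.Int.floordiv (end_ - start) 2 = (end_ - start) / 2 :=
      PySem.Int.floordiv_eq_ediv_of_pos (by norm_num)
    simp only [h2]; omega
  · have h2 : PySem.Int.floordiv (end_ - start) 2 = (end_ - start) / 2 :=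
      PySem.Int.floordiv_eq_ediv_of_pos (by norm_num)
    simp only [h2]; omega

def searchForNextIndex (letters : List String) (target : String) : Int :=
  searchForNextIndexLoop letters target 0 (letters.length : Int)

-- ===== PORT B =====
-- the for loop over enumerate(letters): i is the running index, return it at the first letter > target.
def searchForNextIndexScan : List String → String → Int → Int
  | [], _target, i => i
  | x :: rest, target, i => if target < x then i else searchForNextIndexScan rest target (i + 1)

def searchForNextIndex_alt (letters : List String) (target : String) : Int :=
  searchForNextIndexScan letters target 0

-- ===== PRECONDITION & SPEC =====
-- Pre_ excludes lists not partitioned around target (some element > target occurring before some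
-- element ≤ target, which sorted input — binary search's contract — never has): there A's returned
-- index is an accident of the probe sequence while B returns the first '> target' position, and
-- neither value is specified.  (Comparisons are stated on .toList, definitionally Python's string order.)
def Pre_searchForNextIndex (letters : List String) (target : String) : Prop :=
  List.Pairwise (fun a b => target.toList < a.toList → target.toList < b.toList) letters
instance (letters : List String) (target : String) : Decidable (Pre_searchForNextIndex letters target) := by
  unfold Pre_searchForNextIndex; infer_instance

def pvWitness_searchForNextIndex : List String × String := (["a", "b", "b", "c"], "b")

def Spec_searchForNextIndex (letters : List String) (target : String) (out : Int) : Prop := out = searchForNextIndex_alt letters target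
instance (letters : List String) (target : String) (out : Int) : Decidable (Spec_searchForNextIndex letters target out) := by unfold Spec_searchForNextIndex; infer_instance

-- ===== CLAIM (what is proved, stated in full; the proofs are below) =====
def Claim_equal_searchForNextIndex : Prop := ∀ (letters : List String) (target : String), Dom_searchForNextIndex letters target → Pre_searchForNextIndex letters target → Spec_searchForNextIndex letters target (searchForNextIndex letters target)

-- ===== LEMMAS AND PROOFS =====

-- partitioning: once an element exceeds target, all later ones do
theorem cross_mono {l : List String} {t : String}
    (hs : List.Pairwise (fun a b => t < a → t < b) l)
    {i j : Nat} (hi : i < l.length) (hj : j < l.length) (hij : i ≤ j)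
    (h : t < l[i]) : t < l[j] := by
  rcases Nat.eq_or_lt_of_le hij with rfl | hlt
  · exact h
  · exact (List.pairwise_iff_getElem.mp hs) i j hi hj hlt h

-- the scan returns i + k where k is the first index whose letter exceeds target
theorem scan_eq (t : String) : ∀ (l : List String) (i : Int) (k : Nat), k ≤ l.length →
    (∀ j (hj : j < l.length), j < k → ¬ t < l[j]) →
    (∀ h : k < l.length, t < l[k]) →
    searchForNextIndexScan l t i = i + (k : Int)
  | [], i, k, hk, _, _ => by simp at hk; simp [searchForNextIndexScan, hk]
  | x :: rest, i, k, hk, hlt, hge => by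
    rw [searchForNextIndexScan]
    split_ifs with hx
    · have hk0 : k = 0 := by
        by_contra h0
        exact hlt 0 (by simp) (Nat.pos_of_ne_zero h0) hx
      simp [hk0]
    · match k with
      | 0 => exact absurd (hge (by simp)) hx
      | k' + 1 =>
        have := scan_eq t rest (i + 1) k' (by simpa using hk)
          (fun j hj hjk => hlt (j + 1) (by simpa using hj) (by omega))
          (fun h => hge (by simpa using h))
        rw [this]; push_cast; ring

-- the binary-search loop, under its invariants, lands on the same first index
theorem loop_eq (l : List String) (t : String)
    (hs : List.Pairwise (fun a b => t < a → t < b) l) :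
    ∀ (n : Nat) (s e : Int), (e - s).toNat = n → 0 ≤ s → s ≤ e → e ≤ (l.length : Int) →
    (∀ j (hj : j < l.length), (j : Int) < s → ¬ t < l[j]) →
    (∀ j (hj : j < l.length), e ≤ (j : Int) → t < l[j]) →
    searchForNextIndexLoop l t s e = searchForNextIndexScan l t 0 := by
  intro n
  induction n using Nat.strong_induction_on with
  | _ n ih =>
    intro s e hn h0 hse hel hlow hhigh
    rw [searchForNextIndexLoop]
    split_ifs with h
    · have h2 : PySem.Int.floordiv (e - s) 2 = (e - s) / 2 :=
        PySem.Int.floordiv_eq_ediv_of_pos (by norm_num)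
      simp only []
      set m : Int := s + PySem.Int.floordiv (e - s) 2 with hm
      have hmb : s ≤ m ∧ m < e := by rw [hm, h2]; omega
      have hm0 : 0 ≤ m := le_trans h0 hmb.1
      have hml : m < (l.length : Int) := lt_of_lt_of_le hmb.2 hel
      have hget : PySem.List.pyGetD l m "" = l[m.toNat]'(by omega) :=
        PySem.List.pyGetD_eq_getElem l "" hm0 hml
      show (if t < PySem.List.pyGetD l m "" then searchForNextIndexLoop l t s m
        else searchForNextIndexLoop l t (m + 1) e) = searchForNextIndexScan l t 0
      rw [hget]
      split_ifs with hc
      · -- letters[m] > target: end = m; every index ≥ m exceeds t by partitioning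
        exact ih (m - s).toNat (by omega) s m rfl h0 hmb.1 (le_of_lt hml) hlow
          (fun j hj hje => cross_mono hs (by omega) hj (by omega) hc)
      · -- letters[m] ≤ target: start = m + 1; no index ≤ m exceeds t
        exact ih (e - (m + 1)).toNat (by omega) (m + 1) e rfl (by omega) (by omega) hel
          (fun j hj hjs hlt => hc (cross_mono hs hj (by omega) (by omega) hlt))
          hhigh
    · -- s = e: the scan stops exactly at index s
      have hse' : s = e := le_antisymm hse (le_of_not_gt h)
      have := scan_eq t l 0 s.toNat (by omega)
        (fun j hj hjk => hlow j hj (by omega))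
        (fun hlt => hhigh s.toNat hlt (by omega))
      rw [this]; omega

-- ===== VERDICT (by name: the statement is the Claim_ definition above) =====
theorem searchForNextIndex_spec : Claim_equal_searchForNextIndex := by
  intro letters target _ hpre
  have hs : List.Pairwise (fun a b => target < a → target < b) letters :=
    hpre.imp (fun h hlt => String.lt_iff_toList_lt.mpr (h (String.lt_iff_toList_lt.mp hlt)))
  unfold Spec_searchForNextIndex searchForNextIndex searchForNextIndex_alt
  exact (loop_eq letters target hs _ 0 (letters.length : Int) rfl (le_refl 0)
    (by exact_mod_cast Nat.zero_le _) (le_refl _) (fun j hj hjs => absurd hjs (by omega)) (fun j hj hje => absurd hje (by exact_mod_cast Nat.not_le.mpr hj)))
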